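-- pv_equiv track=rewrite | github.com/dfligor/clientcloak | src/clientcloak/onnx_ner.py | _build_words_mask
-- ===== SOURCE A (Python) =====
-- def _build_words_mask(word_ids: list[int | None], prompt_len: int) -> list[int]:
--     """Create the words_mask that maps subwords → 1-indexed text-word positions.
--
--     Prompt words (indices 0..prompt_len-1) are masked as 0.
--     Only the *first* subword of each text word gets a non-zero value.
--     """
--     mask: list[int] = []
--     prev_wid: int | None = None
--     seen_words = 0
--
--     for wid in word_ids:
--         if wid is None:
--             mask.append(0)
--         elif wid != prev_wid:
--             seen_words += 1
--             if seen_words <= prompt_len: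
--                 mask.append(0)
--             else:
--                 mask.append(seen_words - prompt_len)
--         else:
--             mask.append(0)
--         prev_wid = wid
--
--     return mask
-- ===== SOURCE B (Python) =====
-- from itertools import groupby
--
--
-- def _build_words_mask(word_ids: list[int | None], prompt_len: int) -> list[int]:
--     """Run-based rewrite: walk consecutive runs of equal word ids with groupby."""
--     mask: list[int] = []
--     seen_words = 0
--     for key, grp in groupby(word_ids):
--         n = sum(1 for _ in grp)
--         if key is None:
--             mask.extend([0] * n)
--         else:
--             seen_words += 1
--             first = 0 if seen_words <= prompt_len else seen_words - prompt_len
--             mask.extend([first] + [0] * (n - 1))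
--     return mask
-- ===== Notes on version B (the rewrite author's own statement) =====
-- stated objective: alternative
-- what changed: Replaces the element-by-element loop tracking prev_wid with an itertools.groupby walk over runs of consecutive equal word ids, keeping one seen_words counter advanced once per non-None run.
import Mathlib
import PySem

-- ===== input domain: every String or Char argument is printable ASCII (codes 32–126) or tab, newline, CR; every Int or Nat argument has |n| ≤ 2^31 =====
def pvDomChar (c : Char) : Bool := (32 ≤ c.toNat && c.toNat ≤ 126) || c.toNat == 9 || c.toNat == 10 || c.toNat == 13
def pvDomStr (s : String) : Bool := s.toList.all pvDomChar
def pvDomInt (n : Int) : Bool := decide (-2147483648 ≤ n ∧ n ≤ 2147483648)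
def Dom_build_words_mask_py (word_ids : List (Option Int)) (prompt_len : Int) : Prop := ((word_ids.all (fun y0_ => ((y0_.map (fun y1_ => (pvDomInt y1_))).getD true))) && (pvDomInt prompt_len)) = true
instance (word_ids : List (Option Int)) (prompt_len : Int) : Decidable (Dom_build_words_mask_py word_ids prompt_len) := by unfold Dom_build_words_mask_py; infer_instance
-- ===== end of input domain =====

-- B rewrites A's element-by-element prev_wid loop as a walk over runs of consecutive
-- equal word ids (itertools.groupby) with a seen_words counter; alternative decomposition.


-- ===== PORT A =====
-- literal transliteration of A's loop body: state = (mask, prev_wid, seen_words)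
def stepA (prompt_len : Int) (st : List Int × Option Int × Int) (wid : Option Int) : List Int × Option Int × Int :=
  match wid with
  | none => (st.1 ++ [0], wid, st.2.2)
  | some _ =>
    if wid ≠ st.2.1 then
      let seen := st.2.2 + 1
      (st.1 ++ [if seen ≤ prompt_len then 0 else seen - prompt_len], wid, seen)
    else (st.1 ++ [0], wid, st.2.2)

def build_words_mask_py (word_ids : List (Option Int)) (prompt_len : Int) : List Int :=
  (word_ids.foldl (stepA prompt_len) ([], none, 0)).1

-- ===== PORT B =====
-- itertools.groupby: split into runs of consecutive equal elements, (key, run length)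
def pvRuns (l : List (Option Int)) : List (Option Int × Nat) :=
  match l with
  | [] => []
  | x :: xs =>
    (x, (xs.takeWhile (· = x)).length + 1) :: pvRuns (xs.dropWhile (· = x))
termination_by l.length
decreasing_by
  simp only [List.length_cons]
  exact Nat.lt_succ_of_le (List.length_dropWhile_le _ _)

-- one run: None run appends n zeros; a word run bumps seen and marks its first subword
def stepB (prompt_len : Int) (st : List Int × Int) (kr : Option Int × Nat) : List Int × Int :=
  match kr.1 with
  | none => (st.1 ++ List.replicate kr.2 0, st.2)
  | some _ =>
    let seen := st.2 + 1
    (st.1 ++ ((if seen ≤ prompt_len then 0 else seen - prompt_len) :: List.replicate (kr.2 - 1) 0), seen)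

def build_words_mask_py_alt (word_ids : List (Option Int)) (prompt_len : Int) : List Int :=
  ((pvRuns word_ids).foldl (stepB prompt_len) ([], 0)).1

-- ===== PRECONDITION & SPEC =====
def Spec_build_words_mask_py (word_ids : List (Option Int)) (prompt_len : Int) (out : List Int) : Prop := out = build_words_mask_py_alt word_ids prompt_len
instance (word_ids : List (Option Int)) (prompt_len : Int) (out : List Int) : Decidable (Spec_build_words_mask_py word_ids prompt_len out) := by unfold Spec_build_words_mask_py; infer_instance

-- ===== CLAIM (what is proved, stated in full; the proofs are below) =====
def Claim_equal_build_words_mask_py : Prop := ∀ (word_ids : List (Option Int)) (prompt_len : Int), Dom_build_words_mask_py word_ids prompt_len → Spec_build_words_mask_py word_ids prompt_len (build_words_mask_py word_ids prompt_len)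

-- ===== LEMMAS AND PROOFS =====

-- suffix produced by A's loop from state (prev, seen)
def goA (p : Int) (prev : Option Int) (seen : Int) : List (Option Int) → List Int
  | [] => []
  | wid :: rest =>
    match wid with
    | none => 0 :: goA p none seen rest
    | some _ =>
      if wid ≠ prev then
        (if seen + 1 ≤ p then 0 else seen + 1 - p) :: goA p wid (seen + 1) rest
      else 0 :: goA p wid seen rest

-- suffix produced by B's loop from counter seen
def goB (p : Int) (seen : Int) : List (Option Int × Nat) → List Int
  | [] => []
  | (none, n) :: rs => List.replicate n 0 ++ goB p seen rs
  | (some _, n) :: rs =>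
    ((if seen + 1 ≤ p then 0 else seen + 1 - p) :: List.replicate (n - 1) 0) ++ goB p (seen + 1) rs

theorem foldA_eq (p : Int) : ∀ (l : List (Option Int)) (acc : List Int) (prev : Option Int) (seen : Int),
    (l.foldl (stepA p) (acc, prev, seen)).1 = acc ++ goA p prev seen l := by
  intro l
  induction l with
  | nil => intro acc prev seen; simp [goA]
  | cons wid rest ih =>
    intro acc prev seen
    match wid with
    | none =>
      rw [List.foldl_cons, show stepA p (acc, prev, seen) none = (acc ++ [0], none, seen) from rfl, ih]
      simp [goA]
    | some v =>
      by_cases h : (some v : Option Int) = prev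
      · subst h
        rw [List.foldl_cons,
          show stepA p (acc, some v, seen) (some v) = (acc ++ [0], some v, seen) by
            simp [stepA], ih]
        simp [goA]
      · rw [List.foldl_cons,
          show stepA p (acc, prev, seen) (some v) =
            (acc ++ [if seen + 1 ≤ p then 0 else seen + 1 - p], some v, seen + 1) by
            simp [stepA, h], ih]
        simp [goA, h]

theorem foldB_eq (p : Int) : ∀ (rs : List (Option Int × Nat)) (acc : List Int) (seen : Int),
    (rs.foldl (stepB p) (acc, seen)).1 = acc ++ goB p seen rs := by
  intro rs
  induction rs with
  | nil => intro acc seen; simp [goB]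
  | cons kr rest ih =>
    intro acc seen
    match kr with
    | (none, n) =>
      rw [List.foldl_cons,
        show stepB p (acc, seen) (none, n) = (acc ++ List.replicate n 0, seen) from rfl, ih]
      simp [goB]
    | (some v, n) =>
      rw [List.foldl_cons,
        show stepB p (acc, seen) (some v, n) =
          (acc ++ ((if seen + 1 ≤ p then 0 else seen + 1 - p) :: List.replicate (n - 1) 0), seen + 1)
          from rfl, ih]
      simp [goB]

-- A's loop over a run of elements all equal to prev appends only zeros
theorem goA_run (p : Int) : ∀ (g : List (Option Int)) (x : Option Int) (seen : Int)
    (rest : List (Option Int)), (∀ e ∈ g, e = x) →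
    goA p x seen (g ++ rest) = List.replicate g.length 0 ++ goA p x seen rest := by
  intro g
  induction g with
  | nil => intro x seen rest _; simp
  | cons e g' ih =>
    intro x seen rest hall
    have he : e = x := hall e (by simp)
    subst he
    have h' : ∀ e' ∈ g', e' = e := fun e' h => hall e' (by simp [h])
    match e with
    | none => simp [goA, ih _ _ _ h', List.replicate_succ]
    | some v => simp [goA, ih _ _ _ h', List.replicate_succ]

theorem main_eq (p : Int) : ∀ (n : Nat) (l : List (Option Int)) (prev : Option Int) (seen : Int),
    l.length ≤ n → (∀ v : Int, l.head? = some (some v) → prev ≠ some v) →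
    goA p prev seen l = goB p seen (pvRuns l) := by
  intro n
  induction n with
  | zero =>
    intro l prev seen hn _
    have : l = [] := List.length_eq_zero_iff.mp (Nat.le_zero.mp hn)
    subst this; simp [pvRuns, goA, goB]
  | succ n ih =>
    intro l prev seen hn hhead
    match l with
    | [] => simp [pvRuns, goA, goB]
    | x :: xs =>
      rw [pvRuns]
      have hsplit : xs = xs.takeWhile (· = x) ++ xs.dropWhile (· = x) :=
        (List.takeWhile_append_dropWhile (p := (· = x)) (l := xs)).symm
      have hall : ∀ e ∈ xs.takeWhile (· = x), e = x := by
        intro e he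
        have := List.mem_takeWhile_imp he
        simpa using this
      have hlen : (xs.dropWhile (· = x)).length ≤ n := by
        have h1 : (xs.dropWhile (· = x)).length ≤ xs.length := List.length_dropWhile_le _ _
        have h2 : xs.length ≤ n := by simpa using Nat.lt_succ_iff.mp (Nat.lt_of_lt_of_le (by simp) hn)
        omega
      have hheadrest : ∀ v : Int, (xs.dropWhile (· = x)).head? = some (some v) → x ≠ some v := by
        intro v hv hx
        have := List.head?_dropWhile_not (p := (· = x)) (l := xs)
        rw [hv] at this
        simp [hx] at this
      match x with
      | none =>
        have hstep : goA p prev seen (none :: xs) = 0 :: goA p none seen xs := by simp [goA]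
        rw [hstep]
        conv_lhs => rw [hsplit]
        rw [goA_run p _ none seen _ hall]
        rw [ih _ none seen hlen hheadrest]
        simp [goB, List.replicate_succ]
      | some v =>
        have hne : prev ≠ some v := hhead v (by simp)
        have hstep : goA p prev seen (some v :: xs) =
            (if seen + 1 ≤ p then 0 else seen + 1 - p) :: goA p (some v) (seen + 1) xs := by
          simp only [goA]
          rw [if_pos (show (some v : Option Int) ≠ prev from fun h => hne (Eq.symm h))]
        rw [hstep]
        conv_lhs => rw [hsplit]
        rw [goA_run p _ (some v) (seen + 1) _ hall]
        rw [ih _ (some v) (seen + 1) hlen hheadrest]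
        simp [goB]

-- ===== VERDICT (by name: the statement is the Claim_ definition above) =====
theorem build_words_mask_py_spec : Claim_equal_build_words_mask_py := by
  intro word_ids prompt_len _
  unfold Spec_build_words_mask_py build_words_mask_py build_words_mask_py_alt
  rw [foldA_eq, foldB_eq]
  simp only [List.nil_append]
  exact main_eq prompt_len word_ids.length word_ids none 0 le_rfl (fun v h hc => by cases hc)
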